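-- pv_equiv track=rewrite | github.com/AlexandrNikitenko97/CodeFights-Company-Bots- | SpaceBot/launchSequenceChecker.py | launchSequenceChecker
-- ===== SOURCE A (Python) =====
-- def launchSequenceChecker(systemNames, stepNumbers):
--     system_dict = {name:[] for name in systemNames}
--     for i in range(len(systemNames)):
--         system_dict[systemNames[i]].append(stepNumbers[i])
--     for step in system_dict.values():
--         for each in range(len(step)-1):
--             if step[each] >= step[each+1]:
--                 return False
--     return True
-- ===== SOURCE B (Python) =====
-- def launchSequenceChecker(systemNames, stepNumbers):
--     last = {}
--     for i in range(len(systemNames)):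
--         name = systemNames[i]
--         step = stepNumbers[i]
--         if name in last and step <= last[name]:
--             return False
--         last[name] = step
--     return True
-- ===== Notes on version B (the rewrite author's own statement) =====
-- stated objective: faster
-- what changed: Replaces the two-phase group-into-a-dict-of-lists then nested adjacent-pair scan with one interleaved pass that keeps only the last step number seen per system and fails as soon as a non-increasing step appears.
import Mathlib
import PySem

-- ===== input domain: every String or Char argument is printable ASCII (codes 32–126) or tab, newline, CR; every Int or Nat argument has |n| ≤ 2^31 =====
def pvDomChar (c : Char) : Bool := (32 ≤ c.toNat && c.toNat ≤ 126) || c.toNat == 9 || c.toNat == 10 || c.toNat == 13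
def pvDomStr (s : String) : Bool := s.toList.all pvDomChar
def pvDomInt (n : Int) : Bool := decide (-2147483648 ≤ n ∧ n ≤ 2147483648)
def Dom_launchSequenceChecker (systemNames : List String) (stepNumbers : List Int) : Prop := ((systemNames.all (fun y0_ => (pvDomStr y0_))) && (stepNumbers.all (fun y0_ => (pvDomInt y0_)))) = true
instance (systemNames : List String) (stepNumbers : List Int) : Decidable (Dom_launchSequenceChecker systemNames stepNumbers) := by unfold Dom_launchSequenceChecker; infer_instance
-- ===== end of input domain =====

-- B replaces A's dict-of-step-lists plus nested adjacent-pair scan by a single pass keeping only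
-- the last step per system, failing immediately on a non-increasing step (objective: faster, constant-factor).

-- ===== PORT A =====
-- 'if step[each] >= step[each+1]: return False' for one index 'each' (indices are in range
-- whenever this is reached; the catch-all branch is only a totality guard)
def pvPairOk (step : List Int) (each : Nat) : Bool :=
  match PySem.List.pyGet? step (each : Int), PySem.List.pyGet? step ((each : Int) + 1) with
  | some a, some b => !(decide (a ≥ b))
  | _, _ => true

-- 'for each in range(len(step)-1): …' with early 'return False' = all indices pass
def pvGroupOk (step : List Int) : Bool :=
  (List.range (step.length - 1)).all (pvPairOk step)

-- 'for i in range(len(systemNames)): system_dict[systemNames[i]].append(stepNumbers[i])':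
-- the range-indexed loop over both lists as simultaneous recursion; none = IndexError on
-- stepNumbers[i] (systemNames[i] is always in range, and the key is always present).
def pvBuildA : List String → List Int → PySem.Dict String (List Int) → Option (PySem.Dict String (List Int))
  | [], _, d => some d
  | _ :: _, [], _ => none
  | n :: ns, s :: ss, d => pvBuildA ns ss (d.modify n [] (fun l => l ++ [s]))

def launchSequenceChecker (systemNames : List String) (stepNumbers : List Int) : Bool :=
  -- the first argument of pvBuildA's dict is 'system_dict = {name:[] for name in systemNames}'
  match pvBuildA systemNames stepNumbers
      (systemNames.foldl (fun d n => d.insert n ([] : List Int)) PySem.Dict.empty) with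
  | none => false   -- unreachable under Pre_ (Python raises IndexError here)
  | some d => d.values.all pvGroupOk

-- ===== PORT B =====
-- single pass over both lists (the Python indexes them over range(len(systemNames)); ported as
-- simultaneous recursion; the [] stepNumbers branch is the IndexError path, outside Pre_)
def pvAltGo : List String → List Int → PySem.Dict String Int → Bool
  | [], _, _ => true
  | _ :: _, [], _ => false
  | n :: ns, s :: ss, last =>
    match last.get? n with
    | some v => if s ≤ v then false else pvAltGo ns ss (last.insert n s)
    | none => pvAltGo ns ss (last.insert n s)

def launchSequenceChecker_alt (systemNames : List String) (stepNumbers : List Int) : Bool :=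
  pvAltGo systemNames stepNumbers PySem.Dict.empty

-- ===== PRECONDITION & SPEC =====
-- Both Pythons raise IndexError when stepNumbers is shorter than systemNames; Pre_ excludes exactly that.
def Pre_launchSequenceChecker (systemNames : List String) (stepNumbers : List Int) : Prop :=
  systemNames.length ≤ stepNumbers.length
instance (systemNames : List String) (stepNumbers : List Int) : Decidable (Pre_launchSequenceChecker systemNames stepNumbers) := by unfold Pre_launchSequenceChecker; infer_instance

def pvWitness_launchSequenceChecker : List String × List Int := (["a", "b", "a"], [1, 5, 2])

def Spec_launchSequenceChecker (systemNames : List String) (stepNumbers : List Int) (out : Bool) : Prop := out = launchSequenceChecker_alt systemNames stepNumbers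
instance (systemNames : List String) (stepNumbers : List Int) (out : Bool) : Decidable (Spec_launchSequenceChecker systemNames stepNumbers out) := by unfold Spec_launchSequenceChecker; infer_instance

-- ===== CLAIM (what is proved, stated in full; the proofs are below) =====
def Claim_equal_launchSequenceChecker : Prop := ∀ (systemNames : List String) (stepNumbers : List Int), Dom_launchSequenceChecker systemNames stepNumbers → Pre_launchSequenceChecker systemNames stepNumbers → Spec_launchSequenceChecker systemNames stepNumbers (launchSequenceChecker systemNames stepNumbers)

-- ===== LEMMAS AND PROOFS =====

-- the step numbers of system n, in scan order
def pvGrp (n : String) (ps : List (String × Int)) : List Int :=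
  (ps.filter (fun p => p.1 == n)).map (·.2)

-- 'strictly increasing, optionally continuing after a last-seen value'
def pvChain : Option Int → List Int → Bool
  | _, [] => true
  | none, x :: xs => pvChain (some x) xs
  | some v, x :: xs => decide (v < x) && pvChain (some x) xs

theorem pvGrp_cons (n m : String) (s : Int) (ps : List (String × Int)) :
    pvGrp n ((m, s) :: ps) = if m = n then s :: pvGrp n ps else pvGrp n ps := by
  by_cases h : m = n <;> simp [pvGrp, h]

theorem pvGrp_eq_nil_of_not_mem (n : String) (ps : List (String × Int))
    (h : n ∉ ps.map (·.1)) : pvGrp n ps = [] := by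
  induction ps with
  | nil => rfl
  | cons p t ih =>
    obtain ⟨m, s⟩ := p
    simp only [List.map_cons, List.mem_cons, not_or] at h
    rw [pvGrp_cons, if_neg (fun e => h.1 e.symm), ih h.2]

theorem pvPairOk_zero (x y : Int) (r : List Int) :
    pvPairOk (x :: y :: r) 0 = !(decide (x ≥ y)) := by
  unfold pvPairOk
  rw [show (((0 : Nat) : Int)) = ((0 : Nat) : Int) from rfl, PySem.List.pyGet?_natCast]
  rw [show (((0 : Nat) : Int) + 1) = ((1 : Nat) : Int) by norm_num, PySem.List.pyGet?_natCast]
  simp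

theorem pvPairOk_succ (x : Int) (l : List Int) (each : Nat) :
    pvPairOk (x :: l) (each + 1) = pvPairOk l each := by
  unfold pvPairOk
  rw [show (((each + 1 : Nat) : Int) + 1) = ((each + 1 + 1 : Nat) : Int) by push_cast; ring,
    PySem.List.pyGet?_natCast, PySem.List.pyGet?_natCast,
    show (((each : Nat) : Int) + 1) = ((each + 1 : Nat) : Int) by push_cast; ring,
    PySem.List.pyGet?_natCast, PySem.List.pyGet?_natCast]
  simp

-- A's inner scan over adjacent indices is exactly pvChain from no predecessor
theorem pvGroupOk_eq_pvChain (l : List Int) : pvGroupOk l = pvChain none l := by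
  induction l with
  | nil => rfl
  | cons x xs ih =>
    cases xs with
    | nil => rfl
    | cons y r =>
      have hfun : pvPairOk (x :: y :: r) ∘ Nat.succ = pvPairOk (y :: r) := by
        funext i
        simpa [Function.comp] using pvPairOk_succ x (y :: r) i
      have hx : pvGroupOk (x :: y :: r) = ((!(decide (x ≥ y))) && pvGroupOk (y :: r)) := by
        simp only [pvGroupOk]
        rw [show List.range ((x :: y :: r).length - 1)
              = 0 :: (List.range ((y :: r).length - 1)).map Nat.succ from by
            simp [List.range_succ_eq_map],
          List.all_cons, List.all_map, hfun, pvPairOk_zero]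
      rw [hx, ih]
      show ((!(decide (x ≥ y))) && pvChain none (y :: r)) = pvChain (some x) (y :: r)
      have hy : pvChain none (y :: r) = pvChain (some y) r := rfl
      have hz : pvChain (some x) (y :: r) = (decide (x < y) && pvChain (some y) r) := rfl
      rw [hy, hz]
      by_cases h : x < y
      · simp [h, not_le.mpr h]
      · simp [h, not_lt.mp h]

-- B's loop computes pvChain for every system, seeded by the last-seen dict
theorem pvAltGo_iff (ns : List String) (ss : List Int) (d : PySem.Dict String Int)
    (h : ns.length ≤ ss.length) :
    pvAltGo ns ss d = true ↔ ∀ n, pvChain (d.get? n) (pvGrp n (ns.zip ss)) = true := by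
  induction ns generalizing ss d with
  | nil => simp [pvAltGo, pvGrp, pvChain]
  | cons n ns ih =>
    cases ss with
    | nil => simp at h
    | cons s ss =>
      have h' : ns.length ≤ ss.length := by simpa using h
      have key : ∀ m, pvChain ((d.insert n s).get? m) (pvGrp m (ns.zip ss)) =
          pvChain (d.get? m) (pvGrp m ((n, s) :: ns.zip ss)) ∨ m = n := by
        intro m; by_cases hm : m = n
        · right; exact hm
        · left
          rw [PySem.Dict.get?_insert_of_ne _ _ hm, pvGrp_cons, if_neg (Ne.symm hm)]
      simp only [List.zip_cons_cons, pvAltGo]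
      cases hv : d.get? n with
      | some v =>
        by_cases hvs : s ≤ v
        · simp only [if_pos hvs]
          constructor
          · intro hf; simp at hf
          · intro hall
            have := hall n
            rw [hv, pvGrp_cons, if_pos rfl] at this
            simp [pvChain] at this
            omega
        · simp only [if_neg hvs, ih ss _ h']
          have hsv : v < s := by omega
          constructor
          · intro hall m
            rcases key m with hk | hm
            · rw [← hk]; exact hall m
            · subst hm
              rw [hv, pvGrp_cons, if_pos rfl]
              have := hall m
              rw [PySem.Dict.get?_insert_self] at this
              simp only [pvChain, Bool.and_eq_true, decide_eq_true_eq]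
              exact ⟨hsv, this⟩
          · intro hall m
            rcases key m with hk | hm
            · rw [hk]; exact hall m
            · subst hm
              rw [PySem.Dict.get?_insert_self]
              have := hall m
              rw [hv, pvGrp_cons, if_pos rfl] at this
              simp only [pvChain, Bool.and_eq_true, decide_eq_true_eq] at this
              exact this.2
      | none =>
        rw [ih ss _ h']
        constructor
        · intro hall m
          by_cases hm : m = n
          · subst hm
            rw [hv, pvGrp_cons, if_pos rfl]
            have := hall m
            rw [PySem.Dict.get?_insert_self] at this
            simpa [pvChain] using this
          · have := hall m
            rw [PySem.Dict.get?_insert_of_ne _ _ hm] at this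
            rw [pvGrp_cons, if_neg (Ne.symm hm)]
            exact this
        · intro hall m
          by_cases hm : m = n
          · subst hm
            rw [PySem.Dict.get?_insert_self]
            have := hall m
            rw [hv, pvGrp_cons, if_pos rfl] at this
            simpa [pvChain] using this
          · rw [PySem.Dict.get?_insert_of_ne _ _ hm]
            have := hall m
            rw [pvGrp_cons, if_neg (Ne.symm hm)] at this
            exact this

-- A's build loop, under Pre_, is the zip fold
theorem pvBuildA_eq (ns : List String) (ss : List Int) (d : PySem.Dict String (List Int))
    (h : ns.length ≤ ss.length) :
    pvBuildA ns ss d = some ((ns.zip ss).foldl (fun d p => d.modify p.1 [] (· ++ [p.2])) d) := by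
  induction ns generalizing ss d with
  | nil => rfl
  | cons n ns ih =>
    cases ss with
    | nil => simp at h
    | cons s ss => exact ih ss _ (by simpa using h)

-- the comprehension dict has every value []
theorem pvInit_getD (ns : List String) (d : PySem.Dict String (List Int))
    (hd : ∀ k, d.getD k [] = []) (k : String) :
    (ns.foldl (fun d n => d.insert n ([] : List Int)) d).getD k [] = [] := by
  induction ns generalizing d with
  | nil => exact hd k
  | cons n ns ih =>
    refine ih _ (fun j => ?_)
    rw [PySem.Dict.getD_insert]
    split_ifs with h
    · rfl
    · exact hd j

-- updating a set with elements it already has changes nothing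
theorem pvSet_update_subset (l s : List String) (h : ∀ x ∈ l, x ∈ s) :
    PySem.Set.update s l = s := by
  induction l generalizing s with
  | nil => rfl
  | cons x t ih =>
    have hx : PySem.Set.add s x = s := by
      simp [PySem.Set.add, PySem.Set.contains, h x (by simp)]
    simp only [PySem.Set.update, List.foldl_cons, hx]
    exact ih s (fun y hy => h y (List.mem_cons_of_mem _ hy))

-- ===== VERDICT (by name: the statement is the Claim_ definition above) =====
theorem launchSequenceChecker_spec : Claim_equal_launchSequenceChecker := by
  intro ns ss _ hpre
  show launchSequenceChecker ns ss = launchSequenceChecker_alt ns ss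
  have hpre' : ns.length ≤ ss.length := hpre
  unfold launchSequenceChecker launchSequenceChecker_alt
  rw [pvBuildA_eq ns ss _ hpre']
  set d0 : PySem.Dict String (List Int) :=
    ns.foldl (fun d n => d.insert n ([] : List Int)) PySem.Dict.empty with hd0
  set dfin := (ns.zip ss).foldl (fun d p => d.modify p.1 [] (· ++ [p.2])) d0 with hdfin
  have hkeys0 : d0.keys = PySem.Set.ofList ns := by
    rw [hd0, PySem.Dict.keys_foldl_insert ns (fun _ _ => ([] : List Int)) PySem.Dict.empty]
    rfl
  have hnodup0 : d0.keys.Nodup := by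
    rw [hd0]
    exact PySem.Dict.nodup_keys_foldl_insert ns _ _ PySem.Dict.nodup_keys_empty
  have hkeys : dfin.keys = PySem.Set.ofList ns := by
    rw [hdfin, PySem.Dict.keys_foldl_modify_key (ns.zip ss) (·.1) ([] : List Int)
      (fun _ p l => l ++ [p.2]) d0, List.map_fst_zip hpre', hkeys0]
    exact pvSet_update_subset ns _ (fun x hx => (PySem.Set.mem_ofList ns x).mpr hx)
  have hnodup : dfin.keys.Nodup := by
    rw [hdfin]
    exact PySem.Dict.nodup_keys_foldl_modify_key (ns.zip ss) (·.1) _ _ d0 hnodup0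
  have hgetD : ∀ k, dfin.getD k [] = pvGrp k (ns.zip ss) := by
    intro k
    rw [hdfin, PySem.Dict.getD_foldl_modify_append (ns.zip ss) d0 k,
      pvInit_getD ns PySem.Dict.empty (fun j => by simp) k]
    rfl
  show dfin.values.all pvGroupOk = pvAltGo ns ss PySem.Dict.empty
  rw [PySem.Dict.values_eq_map_keys dfin hnodup [], List.all_map, hkeys]
  rw [Bool.eq_iff_iff, List.all_eq_true,
    pvAltGo_iff ns ss PySem.Dict.empty hpre']
  constructor
  · intro hall k
    by_cases hk : k ∈ ns
    · have := hall k ((PySem.Set.mem_ofList ns k).mpr hk)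
      simpa [Function.comp, hgetD k, pvGroupOk_eq_pvChain, PySem.Dict.get?_empty] using this
    · have hnil : pvGrp k (ns.zip ss) = [] :=
        pvGrp_eq_nil_of_not_mem k _ (fun hmem => hk (List.map_fst_zip hpre' ▸ hmem))
      rw [PySem.Dict.get?_empty, hnil]
      rfl
  · intro hall k hk
    have := hall k
    rw [PySem.Dict.get?_empty] at this
    simpa [Function.comp, hgetD k, pvGroupOk_eq_pvChain] using this
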